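-- pv_equiv track=rewrite | github.com/Benjamin7991/My-Code-Wars-Solutions | 7KYU/Sort_Men_From_Boys.py | men_from_boys
-- ===== SOURCE A (Python) =====
-- def men_from_boys(arr):
--
--     even= sorted([x for x in arr if x % 2 ==0])
--     odd = sorted([x for x in arr if x % 2 != 0])[::-1]
--     result = []
--
--     for item in even + odd:
--         if item not in result:
--             result.append(item)
--
--     return result
-- ===== SOURCE B (Python) =====
-- def men_from_boys(arr):
--     s = sorted(set(arr))
--     evens = [x for x in s if x % 2 == 0]
--     odds = [x for x in s if x % 2 != 0]
--     return evens + odds[::-1]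
-- ===== Notes on version B (the rewrite author's own statement) =====
-- stated objective: faster
-- what changed: B dedupes once with set(), sorts the whole deduped list a single time, and splits it by parity with two linear filter passes (odds reversed), instead of A's two per-parity sorts of duplicate-laden lists followed by a quadratic 'not in result' dedup loop.
import Mathlib
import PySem

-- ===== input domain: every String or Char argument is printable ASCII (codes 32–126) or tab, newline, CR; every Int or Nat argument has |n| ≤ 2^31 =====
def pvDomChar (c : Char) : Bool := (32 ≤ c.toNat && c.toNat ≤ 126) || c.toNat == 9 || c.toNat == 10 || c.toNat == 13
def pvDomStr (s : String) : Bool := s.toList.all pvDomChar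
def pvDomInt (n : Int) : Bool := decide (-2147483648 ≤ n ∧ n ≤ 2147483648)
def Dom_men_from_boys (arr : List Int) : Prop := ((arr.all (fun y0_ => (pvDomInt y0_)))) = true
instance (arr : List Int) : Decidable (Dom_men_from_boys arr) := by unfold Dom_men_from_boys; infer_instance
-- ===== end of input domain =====

-- B replaces A's two per-parity sorts + quadratic 'not in result' dedup loop by one
-- sort of the deduped set followed by two linear parity filter passes (objective: faster).

-- ===== PORT A =====
def men_from_boys (arr : List Int) : List Int :=
  let even := PySem.List.sorted (arr.filter (fun x => PySem.Int.mod x 2 == 0)) (fun x => x) false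
  let odd := (PySem.List.slice? (PySem.List.sorted (arr.filter (fun x => PySem.Int.mod x 2 != 0)) (fun x => x) false) none none (-1)).getD []
  (even ++ odd).foldl (fun result item => if !(result.contains item) then result ++ [item] else result) []

-- ===== PORT B =====
def men_from_boys_alt (arr : List Int) : List Int :=
  let s := PySem.List.sorted (PySem.Set.ofList arr) (fun x => x) false
  let evens := s.filter (fun x => PySem.Int.mod x 2 == 0)
  let odds := s.filter (fun x => PySem.Int.mod x 2 != 0)
  evens ++ (PySem.List.slice? odds none none (-1)).getD []

-- ===== PRECONDITION & SPEC =====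
def Spec_men_from_boys (arr : List Int) (out : List Int) : Prop := out = men_from_boys_alt arr
instance (arr : List Int) (out : List Int) : Decidable (Spec_men_from_boys arr out) := by unfold Spec_men_from_boys; infer_instance

-- ===== CLAIM (what is proved, stated in full; the proofs are below) =====
def Claim_equal_men_from_boys : Prop := ∀ (arr : List Int), Dom_men_from_boys arr → Spec_men_from_boys arr (men_from_boys arr)

-- ===== LEMMAS AND PROOFS =====

-- A's dedup loop step is exactly PySem.Set.add
theorem pv_step_eq :
    (fun (result : List Int) item => if !(result.contains item) then result ++ [item] else result)
      = fun r x => PySem.Set.add r x := by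
  funext r x
  simp [PySem.Set.add, PySem.Set.contains]

theorem pv_foldl_add_shift (b : List Int) :
    ∀ (acc s : List Int), (∀ x ∈ b, x ∉ acc) →
      b.foldl PySem.Set.add (acc ++ s) = acc ++ b.foldl PySem.Set.add s := by
  induction b with
  | nil => intro acc s _; simp
  | cons y t ih =>
    intro acc s hdis
    have hy : y ∉ acc := hdis y (by simp)
    have hadd : PySem.Set.add (acc ++ s) y = acc ++ PySem.Set.add s y := by
      by_cases hys : y ∈ s <;> simp [PySem.Set.add, PySem.Set.contains, hys, hy]
    rw [List.foldl_cons, hadd, List.foldl_cons]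
    exact ih acc (PySem.Set.add s y) (fun x hx => hdis x (by simp [hx]))

theorem pv_foldl_add_pairwise {R : Int → Int → Prop} (b : List Int) :
    ∀ (acc : List Int), acc.Pairwise R → b.Pairwise R →
      (∀ a ∈ acc, ∀ x ∈ b, R a x) →
      (b.foldl PySem.Set.add acc).Pairwise R := by
  induction b with
  | nil => intro acc ha _ _; simpa using ha
  | cons y t ih =>
    intro acc ha hb hcross
    have hb' : t.Pairwise R := hb.of_cons
    have hyR : ∀ x ∈ t, R y x := (List.pairwise_cons.mp hb).1
    simp only [List.foldl_cons]
    by_cases hys : y ∈ acc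
    · have : PySem.Set.add acc y = acc := by
        simp [PySem.Set.add, PySem.Set.contains, hys]
      rw [this]
      exact ih acc ha hb' (fun a hA x hx => hcross a hA x (by simp [hx]))
    · have : PySem.Set.add acc y = acc ++ [y] := by
        simp [PySem.Set.add, PySem.Set.contains, hys]
      rw [this]
      refine ih (acc ++ [y]) ?_ hb' ?_
      · refine List.pairwise_append.mpr ⟨ha, by simp, ?_⟩
        intro a hA z hz
        have hzy : z = y := by simpa using hz
        exact hcross a hA z (by simp [hzy])
      · intro a hA z hz
        rcases List.mem_append.mp hA with h | h
        · exact hcross a h z (by simp [hz])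
        · have hay : a = y := by simpa using h
          rw [hay]
          exact hyR z hz

-- two strictly increasing lists with the same members are equal
theorem pv_eq_of_pairwise_lt (a b : List Int)
    (ha : a.Pairwise (· < ·)) (hb : b.Pairwise (· < ·))
    (hm : ∀ x, x ∈ a ↔ x ∈ b) : a = b := by
  have hna : a.Nodup := ha.imp (fun h => ne_of_lt h)
  have hnb : b.Nodup := hb.imp (fun h => ne_of_lt h)
  have hp : a.Perm b := (List.perm_ext_iff_of_nodup hna hnb).mpr hm
  have h1 : PySem.List.sorted a (fun x => x) false = a :=
    PySem.List.sorted_eq_of_perm_of_pairwise_lt _ _ _ (List.Perm.refl a) ha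
  have h2 : PySem.List.sorted a (fun x => x) false = b :=
    PySem.List.sorted_eq_of_perm_of_pairwise_lt _ _ _ hp.symm hb
  rw [← h1, h2]

theorem pv_eq_of_pairwise_gt (a b : List Int)
    (ha : a.Pairwise (fun u v => v < u)) (hb : b.Pairwise (fun u v => v < u))
    (hm : ∀ x, x ∈ a ↔ x ∈ b) : a = b := by
  have := pv_eq_of_pairwise_lt a.reverse b.reverse
    (List.pairwise_reverse.mpr ha) (List.pairwise_reverse.mpr hb)
    (by intro x; simp [hm x])
  exact List.reverse_injective this

theorem pv_lt_of_le_nodup (l : List Int) (h : l.Pairwise (· ≤ ·)) (hn : l.Nodup) :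
    l.Pairwise (· < ·) :=
  (h.and hn).imp (fun hc => lt_of_le_of_ne hc.1 hc.2)

theorem pv_ge_of_le_nodup (l : List Int) (h : l.Pairwise (fun u v => v ≤ u)) (hn : l.Nodup) :
    l.Pairwise (fun u v => v < u) :=
  (h.and hn).imp (fun hc => lt_of_le_of_ne hc.1 (Ne.symm hc.2))

-- ===== VERDICT (by name: the statement is the Claim_ definition above) =====
theorem men_from_boys_spec : Claim_equal_men_from_boys := by
  intro arr _
  unfold Spec_men_from_boys men_from_boys men_from_boys_alt
  simp only [PySem.List.slice?_none_none_neg_one, Option.getD_some]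
  rw [pv_step_eq]
  set p : Int → Bool := fun x => PySem.Int.mod x 2 == 0 with hp
  set E := PySem.List.sorted (arr.filter p) (fun x => x) false with hE
  set O := PySem.List.sorted (arr.filter (fun x => PySem.Int.mod x 2 != 0)) (fun x => x) false with hO
  set s := PySem.List.sorted (PySem.Set.ofList arr) (fun x => x) false with hs
  have memE : ∀ x, x ∈ E ↔ x ∈ arr ∧ p x = true := by
    intro x; rw [hE, PySem.List.mem_sorted, List.mem_filter]
  have memO : ∀ x, x ∈ O ↔ x ∈ arr ∧ p x = false := by
    intro x; rw [hO, PySem.List.mem_sorted, List.mem_filter]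
    simp [hp, bne]
  have mems : ∀ x, x ∈ s ↔ x ∈ arr := by
    intro x; rw [hs, PySem.List.mem_sorted, PySem.Set.mem_ofList]
  have hdis : ∀ x ∈ O.reverse, x ∉ PySem.Set.ofList E := by
    intro x hx hxe
    rw [PySem.Set.mem_ofList, memE] at hxe
    rw [List.mem_reverse, memO] at hx
    rw [hx.2] at hxe; exact absurd hxe.2 (by simp)
  -- split the dedup loop at the evens/odds boundary
  have hsplit : (E ++ O.reverse).foldl (fun r x => PySem.Set.add r x) []
      = PySem.Set.ofList E ++ PySem.Set.ofList O.reverse := by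
    rw [List.foldl_append]
    have : E.foldl (fun r x => PySem.Set.add r x) [] = PySem.Set.ofList E := by
      rw [PySem.Set.ofList_eq_foldl]
    rw [this]
    have := pv_foldl_add_shift O.reverse (PySem.Set.ofList E) [] hdis
    simpa [PySem.Set.ofList_eq_foldl] using this
  rw [hsplit]
  -- evens agree
  have hev : PySem.Set.ofList E = s.filter p := by
    apply pv_eq_of_pairwise_lt
    · apply pv_lt_of_le_nodup _ _ (PySem.Set.nodup_ofList E)
      rw [PySem.Set.ofList_eq_foldl]
      exact pv_foldl_add_pairwise E [] (by simp)
        (PySem.List.sorted_pairwise (arr.filter p) (fun x => x)) (by simp)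
    · exact (PySem.List.sorted_ofList_pairwise_lt arr).filter p
    · intro x
      rw [PySem.Set.mem_ofList, memE, List.mem_filter, mems]
  -- odds agree
  have hod : PySem.Set.ofList O.reverse = (s.filter (fun x => PySem.Int.mod x 2 != 0)).reverse := by
    apply pv_eq_of_pairwise_gt
    · apply pv_ge_of_le_nodup _ _ (PySem.Set.nodup_ofList O.reverse)
      rw [PySem.Set.ofList_eq_foldl]
      refine pv_foldl_add_pairwise O.reverse [] (by simp) ?_ (by simp)
      exact List.pairwise_reverse.mpr
        (PySem.List.sorted_pairwise (arr.filter (fun x => PySem.Int.mod x 2 != 0)) (fun x => x))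
    · exact List.pairwise_reverse.mpr ((PySem.List.sorted_ofList_pairwise_lt arr).filter _)
    · intro x
      rw [PySem.Set.mem_ofList, List.mem_reverse, memO, List.mem_reverse, List.mem_filter, mems]
      simp [hp, bne]
  rw [hev, hod]
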